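-- pv_equiv track=rewrite | github.com/KunjShah95/job-snipper | utils/text_analyzer.py | analyze_section_modifications
-- ===== SOURCE A (Python) =====
-- from collections import Counter
-- from typing import List, Dict
--
-- def analyze_section_modifications(versions: List[Dict]) -> Dict[str, int]:
--     """
--     Analyzes a list of versions to count modifications per section.
--     This is a simplified simulation. A real implementation would compare
--     the content of parsed sections between consecutive versions.
--
--     Args:
--         versions: A list of version dictionaries.
--
--     Returns:
--         A dictionary with section names as keys and modification counts as values.
--     """
--     if len(versions) < 2:
--         return {}
--
--     # Simulate by tracking changes in notes or names.
--     # A real implementation would require diffing parsed content.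
--     mod_counts = Counter()
--     for i in range(len(versions) - 1):
--         # This is a placeholder for real diffing logic.
--         # We'll simulate some changes based on version metadata.
--         mod_counts["Experience"] += 3
--         mod_counts["Skills"] += 2
--         mod_counts["Summary"] += 1
--         mod_counts["Education"] += 1
--
--     return dict(mod_counts)
-- ===== SOURCE B (Python) =====
-- from typing import List, Dict
--
-- def analyze_section_modifications(versions: List[Dict]) -> Dict[str, int]:
--     if len(versions) < 2:
--         return {}
--     n = len(versions) - 1
--     return {"Experience": 3 * n, "Skills": 2 * n, "Summary": n, "Education": n}
-- ===== Notes on version B (the rewrite author's own statement) =====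
-- stated objective: simpler
-- what changed: Replaces the per-pair accumulation loop over a Counter with a closed-form dictionary computed directly from n = len(versions) - 1.
import Mathlib
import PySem

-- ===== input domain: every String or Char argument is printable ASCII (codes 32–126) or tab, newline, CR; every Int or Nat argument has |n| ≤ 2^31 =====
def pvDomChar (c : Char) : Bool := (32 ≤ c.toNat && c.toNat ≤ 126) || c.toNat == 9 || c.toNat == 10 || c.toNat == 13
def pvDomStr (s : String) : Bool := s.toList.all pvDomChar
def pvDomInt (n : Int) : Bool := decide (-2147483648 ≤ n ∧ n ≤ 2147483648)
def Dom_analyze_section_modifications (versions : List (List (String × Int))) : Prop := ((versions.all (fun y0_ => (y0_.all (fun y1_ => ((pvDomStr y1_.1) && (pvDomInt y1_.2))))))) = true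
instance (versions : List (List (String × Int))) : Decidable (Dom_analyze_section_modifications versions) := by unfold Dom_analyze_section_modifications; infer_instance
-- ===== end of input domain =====

-- B replaces A's per-pair Counter accumulation loop with a closed-form dict from n = len(versions) - 1 (objective: simpler).

-- ===== PORT A =====
-- the body of A's loop: four Counter increments (i is unused, as in the Python)
def pvStepA (d : PySem.Dict String Int) (_i : Int) : PySem.Dict String Int :=
  ((((d.modify "Experience" 0 (· + 3)).modify "Skills" 0 (· + 2)).modify "Summary" 0 (· + 1)).modify "Education" 0 (· + 1))

def analyze_section_modifications (versions : List (List (String × Int))) : List (String × Int) :=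
  if (versions.length : Int) < 2 then []
  else
    ((PySem.List.pyRange 0 ((versions.length : Int) - 1) 1).foldl pvStepA PySem.Dict.empty).items

-- ===== PORT B =====
def analyze_section_modifications_alt (versions : List (List (String × Int))) : List (String × Int) :=
  if (versions.length : Int) < 2 then []
  else
    let n : Int := (versions.length : Int) - 1
    [("Experience", 3 * n), ("Skills", 2 * n), ("Summary", n), ("Education", n)]

-- ===== PRECONDITION & SPEC =====
def Spec_analyze_section_modifications (versions : List (List (String × Int))) (out : List (String × Int)) : Prop := out = analyze_section_modifications_alt versions
instance (versions : List (List (String × Int))) (out : List (String × Int)) : Decidable (Spec_analyze_section_modifications versions out) := by unfold Spec_analyze_section_modifications; infer_instance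

-- ===== CLAIM (what is proved, stated in full; the proofs are below) =====
def Claim_equal_analyze_section_modifications : Prop := ∀ (versions : List (List (String × Int))), Dom_analyze_section_modifications versions → Spec_analyze_section_modifications versions (analyze_section_modifications versions)

-- ===== LEMMAS AND PROOFS =====

-- the counter state after k iterations of A's loop (k ≥ 1)
def pvStateA (k : Int) : PySem.Dict String Int :=
  ⟨[("Experience", 3 * k), ("Skills", 2 * k), ("Summary", k), ("Education", k)]⟩

theorem pvStepA_empty (i : Int) : pvStepA PySem.Dict.empty i = pvStateA 1 := by
  simp [pvStepA, pvStateA, PySem.Dict.modify, PySem.Dict.insert, PySem.Dict.getD,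
    PySem.Dict.get?, PySem.Dict.contains, PySem.Dict.empty]

theorem pvStepA_state (k : Int) (i : Int) : pvStepA (pvStateA k) i = pvStateA (k + 1) := by
  simp [pvStepA, pvStateA, PySem.Dict.modify, PySem.Dict.insert, PySem.Dict.getD,
    PySem.Dict.get?, PySem.Dict.contains]
  constructor <;> ring

theorem pvFoldA (l : List Int) : ∀ k : Int, l.foldl pvStepA (pvStateA k) = pvStateA (k + l.length) := by
  induction l with
  | nil => intro k; simp
  | cons x xs ih =>
      intro k
      simp only [List.foldl_cons, pvStepA_state, ih, List.length_cons]
      congr 1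
      push_cast
      ring

-- ===== VERDICT (by name: the statement is the Claim_ definition above) =====
theorem analyze_section_modifications_spec : Claim_equal_analyze_section_modifications := by
  intro versions _
  unfold Spec_analyze_section_modifications analyze_section_modifications analyze_section_modifications_alt
  by_cases h : (versions.length : Int) < 2
  · rw [if_pos h, if_pos h]
  · rw [if_neg h, if_neg h]
    have h1 : (0 : Int) < (versions.length : Int) - 1 := by omega
    rw [PySem.List.pyRange_one_cons h1, List.foldl_cons, pvStepA_empty, pvFoldA,
      PySem.List.length_pyRange_one]
    simp only [pvStateA]
    have : (1 : Int) + ((versions.length : Int) - 1 - (0 + 1)).toNat = (versions.length : Int) - 1 := by omega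
    rw [this]
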